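/- GENERATED by mk_final_copies.py from the proof of the farm's unit `start_decoder.1` (farm:start_decoder.1.1: Proof.lean) as the
   re-elaboration sweep compiled it — do not edit. -/
import Asan.CheckWalk
import Vorbis.Spec.Units.start_decoder_1

open X86 X86.User Asan Vorbis Vorbis.Spec Vorbis.Spec.StartDecoder

set_option maxRecDepth 4000
set_option maxHeartbeats 4000000

namespace Vorbis.Spec.start_decoder_1

/-- The address of an inline shadow store, `rbx + C00000H + i` with `rbx = (RA − 1400) >> 3`, is the shadow address of
granule `i` of the protected frame (`RA` = the stack pointer at the entry). -/
theorem shadow_addr (sp : Word) (h8 : sp.toNat % 8 = 0) (hlo : 0x700000 + 1888 ≤ sp.toNat) (hhi : sp.toNat + 8 ≤ 0x800000)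
    (i : Nat) (hi : i < 0x1000) :
    (sp - 1400) >>> 3 + UInt64.ofNat (0xC00000 + i) = shadowAddr ((sp.toNat - 1400) / 8 + i) := by
  unfold shadowAddr
  u_omega

/-- The eleven inline shadow stores of the prologue (0x1139bd … 0x113a21), as the walker writes them, are the frame layout's
`prologue` (Vorbis/Frames.lean) applied at the frame's first granule: the form `ShadowInv.prologue_ra` speaks of. -/
theorem shadow_nest (M : Mem) (sp : Word) (h8 : sp.toNat % 8 = 0) (hlo : 0x700000 + 1888 ≤ sp.toNat)
    (hhi : sp.toNat + 8 ≤ 0x800000) :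
    (((((((((((M.writeLE ((sp - 1400) >>> 3 + 12582912) 4 4059165169).writeLE
      ((sp - 1400) >>> 3 + 12582916) 4 4060410353).writeLE
      ((sp - 1400) >>> 3 + 12582920) 4 4060541444).writeLE
      ((sp - 1400) >>> 3 + 12582924) 4 62194).writeLE
      ((sp - 1400) >>> 3 + 12582932) 4 4075945984).writeLE
      ((sp - 1400) >>> 3 + 12582936) 4 62194).writeLE
      ((sp - 1400) >>> 3 + 12583060) 4 4076863488).writeLE
      ((sp - 1400) >>> 3 + 12583064) 4 4092851187).writeLE
      ((sp - 1400) >>> 3 + 12583068) 4 4092851187).writeLE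
      ((sp - 1400) >>> 3 + 12583072) 4 4092851187).writeLE
      ((sp - 1400) >>> 3 + 12583076) 4 4092851187) =
    storesMem M ((sp.toNat - 1400) / 8) Vorbis.Frames.start_decoder.prologue := by
  have a0 := shadow_addr sp h8 hlo hhi 0 (by decide)
  have a1 := shadow_addr sp h8 hlo hhi 4 (by decide)
  have a2 := shadow_addr sp h8 hlo hhi 8 (by decide)
  have a3 := shadow_addr sp h8 hlo hhi 12 (by decide)
  have a4 := shadow_addr sp h8 hlo hhi 20 (by decide)
  have a5 := shadow_addr sp h8 hlo hhi 24 (by decide)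
  have a6 := shadow_addr sp h8 hlo hhi 148 (by decide)
  have a7 := shadow_addr sp h8 hlo hhi 152 (by decide)
  have a8 := shadow_addr sp h8 hlo hhi 156 (by decide)
  have a9 := shadow_addr sp h8 hlo hhi 160 (by decide)
  have a10 := shadow_addr sp h8 hlo hhi 164 (by decide)
  simp only [Vorbis.Frames.start_decoder, storesMem, List.foldl]
  rw [← a0, ← a1, ← a2, ← a3, ← a4, ← a5, ← a6, ← a7, ← a8, ← a9, ← a10]
  rfl


/-- The two windows the prologue writes: the own stack frame `[RA − 1480, RA)` and the 168 shadow bytes of the protected frame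
(`RA` = the stack pointer at the entry). -/
def wins2 (RA : Nat) : List Span :=
  [⟨RA - 1480, RA⟩, ⟨0xC00000 + (RA - 1400) / 8, 0xC00000 + (RA - 1400) / 8 + 168⟩]

/-- A range that lies off the own stack frame and below the shadow reads the same after the prologue. -/
theorem eqOn_of_wins2 {RA : Nat} {m m' : Mem} (hs : Mem.SameExcept (wins2 RA) m m') (lo hi : Nat)
    (h1 : hi ≤ RA - 1480 ∨ RA ≤ lo) (h2 : hi ≤ 0xC00000) : Mem.EqOn lo hi m m' := by
  apply hs.eqOn
  intro w hw
  simp only [wins2, List.mem_cons, List.mem_nil_iff, or_false] at hw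
  rcases hw with rfl | rfl
  · simp only
    omega
  · simp only
    omega

/-- H0 (after the five stream stores) survives when the bytes of `*f` read the same. -/
theorem h0s_frame {m m' : Mem} {f : Nat} (h : H0s m f) (hobj : Mem.EqOn f (f + 1808) m m') (hf : f + 1808 ≤ 0xC00000) :
    H0s m' f := by
  obtain ⟨z0, z0', z1, z2, z3, ht, hc⟩ := h
  simp only [voff] at z0 z0' z1 z2 z3
  simp only [vacc, voff] at ht hc
  refine ⟨?_, ?_, ?_, ?_, ?_, ?_, ?_⟩
  · simp only [voff]
    exact z0.frame (hobj.mono (by omega) (by omega)) (by omega)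
  · simp only [voff]
    exact z0'.frame (hobj.mono (by omega) (by omega)) (by omega)
  · simp only [voff]
    exact z1.frame (hobj.mono (by omega) (by omega)) (by omega)
  · simp only [voff]
    exact z2.frame (hobj.mono (by omega) (by omega)) (by omega)
  · simp only [voff]
    exact z3.frame (hobj.mono (by omega) (by omega)) (by omega)
  · simp only [vacc, voff]
    rw [hobj.i32 (f + 132) (by omega) (by omega) (by omega), hobj.i32 (f + 120) (by omega) (by omega) (by omega)]
    exact ht
  · simp only [vacc, voff]
    rw [hobj.i32 (f + 1792) (by omega) (by omega) (by omega)]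
    exact hc

/-- **Point P3 after the prologue**: the prologue stores into the own stack frame and into the shadow only, so `*f` reads the
same (`hobj`); the live set grew by the own frame's objects (`hl`), and the shadow covers it (`hcov`: `ShadowInv.covers` of the
layer after the prologue). Every clause of P3 is carried by its own frame lemma. -/
theorem p3_frame {len : Nat} {A0 : Arena × List Obj} {m m' : Mem} {f : Nat} {Live Live' : Nat → Prop}
    (h : Real.P3 len A0 (StartDecoder.blk len f A0) Live m f)
    (hcov : Covers Live' m') (hl : ∀ x, Live x → Live' x)
    (hobj : Mem.EqOn f (f + 1808) m m') (hf : f + 1808 ≤ 0xC00000) :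
    Real.P3 len A0 (StartDecoder.blk len f A0) Live' m' f := by
  have hbs : (objBlock f).Same m m' := hobj
  have hstart := h.start
  simp only [vacc, voff] at hstart
  refine ⟨⟨hcov, h.env.ok, h.env.live.mono hl⟩, h0s_frame h.h0 hobj hf, ?_, h.fresh,
    h.bits.frame_fields (Bits.SameFields.of_same hbs), ?_⟩
  · have hf64 : f + Off.sizeof.stb_vorbis ≤ 2 ^ 64 := by
      simp only [voff]
      omega
    exact ArenaOK.frame_obj h.arena hf64 hbs
  · simp only [vacc, voff]
    rw [hobj.u64 (f + 48) (by omega) (by omega) (by omega), hobj.u64 (f + 56) (by omega) (by omega) (by omega)]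
    exact hstart

/-- **The exit assertion of the prologue, from what the walk gives**: the state `s` at 0x113a2b whose memory is the entry memory
with the ten stack stores (`M`, no shadow byte touched) and then the frame layout's eleven shadow stores; the registers and the
eight stack slots as the walker reads them. -/
theorem body2_of_walk {u₀ : State} {len : Nat} {A0 : Arena × List Obj} {frames : List (Nat × FrameLayout)} {ret : Word}
    {v s : State} {M : Mem}
    (he : AtEntry (conv u₀) L.start_decoder.entry StartDecoder.depth ret v)
    (hpre : (StartDecoder.spec ⟨len, A0, frames, v, ret⟩).pre v)
    (hunM : ShadowUntouched v.mem M)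
    (hmem : s.mem = storesMem M (((v.reg .rsp).toNat - 1400) / 8) Vorbis.Frames.start_decoder.prologue)
    (hsameM : Mem.SameExcept [⟨(v.reg .rsp).toNat - 1480, (v.reg .rsp).toNat⟩] v.mem M)
    (hrip : s.rip = L.start_decoder.cut1)
    (hrsp : s.reg .rsp = v.reg .rsp - 1480)
    (hrbp : s.reg .rbp = v.reg .rdi)
    (hrdi : s.reg .rdi = v.reg .rdi)
    (midx : M.readLE (v.reg .rsp - 1472) 8 = ((v.reg .rsp - 1400) >>> 3).toNat)
    (mrbx : M.readLE (v.reg .rsp - 48) 8 = (v.reg .rbx).toNat)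
    (mrbp : M.readLE (v.reg .rsp - 40) 8 = (v.reg .rbp).toNat)
    (mr12 : M.readLE (v.reg .rsp - 32) 8 = (v.reg .r12).toNat)
    (mr13 : M.readLE (v.reg .rsp - 24) 8 = (v.reg .r13).toNat)
    (mr14 : M.readLE (v.reg .rsp - 16) 8 = (v.reg .r14).toNat)
    (mr15 : M.readLE (v.reg .rsp - 8) 8 = (v.reg .r15).toNat)
    (mra : M.readLE (v.reg .rsp) 8 = v.mem.readLE (v.reg .rsp) 8)
    (hcode : Mem.EqOn L.textLo L.textHi u₀.mem s.mem)
    (hinv : abiInv s) :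
    Body2 u₀ ⟨len, A0, frames, v, ret⟩ A0 s := by
  obtain ⟨hsh, hp3, hhand, hlog⟩ := hpre
  have h8 : (v.reg .rsp).toNat % 8 = 0 := he.align
  have hroom : 0x700000 + 1888 ≤ (v.reg .rsp).toNat := he.room
  have htop : (v.reg .rsp).toNat + 8 ≤ 0x800000 := he.top
  -- the eleven shadow stores write the 168 shadow bytes of the frame only
  have hin : ∀ st, st ∈ Vorbis.Frames.start_decoder.prologue → st.idx + st.width ≤ 168 :=
    Vorbis.Frames.start_decoder_ok.2.1
  have hsameS := storesMem_sameExcept M (((v.reg .rsp).toNat - 1400) / 8) 168 Vorbis.Frames.start_decoder.prologue hin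
    (by omega)
  rw [← hmem] at hsameS
  have hsame : Mem.SameExcept (wins2 (v.reg .rsp).toNat) v.mem s.mem := by
    refine Mem.SameExcept.trans (hsameM.mono ?_) (hsameS.mono ?_)
    · intro w hw a ha1 ha2
      have ew : w = ⟨(v.reg .rsp).toNat - 1480, (v.reg .rsp).toNat⟩ := List.mem_singleton.mp hw
      subst ew
      exact ⟨_, List.mem_cons_self, ha1, ha2⟩
    · intro w hw a ha1 ha2
      have ew : w = ⟨0xC00000 + ((v.reg .rsp).toNat - 1400) / 8, 0xC00000 + ((v.reg .rsp).toNat - 1400) / 8 + 168⟩ :=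
        List.mem_singleton.mp hw
      subst ew
      exact ⟨_, List.mem_cons_of_mem _ List.mem_cons_self, ha1, ha2⟩
  -- a stack slot reads the same after the shadow stores
  have up : ∀ (a : Word) (x : Nat), a.toNat + 8 ≤ 0xC00000 → M.readLE a 8 = x → s.mem.readLE a 8 = x := by
    intro a x ha hx
    have hq : Mem.EqOn a.toNat (a.toNat + 8) M s.mem := by
      apply hsameS.eqOn
      intro w hw
      have ew : w = ⟨0xC00000 + ((v.reg .rsp).toNat - 1400) / 8, 0xC00000 + ((v.reg .rsp).toNat - 1400) / 8 + 168⟩ :=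
        List.mem_singleton.mp hw
      subst ew
      simp only
      omega
    rw [hq.readLE a 8 (Nat.le_refl _) (Nat.le_refl _) (by omega)]
    exact hx
  have hidx := up _ _ (by u_omega) midx
  have hrbx := up _ _ (by u_omega) mrbx
  have hrbp' := up _ _ (by u_omega) mrbp
  have hr12 := up _ _ (by u_omega) mr12
  have hr13 := up _ _ (by u_omega) mr13
  have hr14 := up _ _ (by u_omega) mr14
  have hr15 := up _ _ (by u_omega) mr15
  have hra : UInt64.ofNat (s.mem.readLE (v.reg .rsp) 8) = ret := by
    rw [up _ _ (by omega) mra]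
    exact he.retAddr
  -- where `*f` is: a live object of the callers, off the own stack frame, below the shadow
  have hpos : 0 < Off.sizeof.stb_vorbis := by
    simp only [voff]
    omega
  have hw := hhand.obj.where_ hsh.inv hsh.offText hpos
  simp only [voff] at hw
  obtain ⟨hw1, hw2, hw3⟩ := hw
  have hobj : Mem.EqOn (v.reg .rdi).toNat ((v.reg .rdi).toNat + 1808) v.mem s.mem :=
    eqOn_of_wins2 hsame _ _ (by omega) (by omega)
  -- the shadow layer with the own frame poisoned
  have hshadow : ShadowInv A0.2 (Ghost.frames' ⟨len, A0, frames, v, ret⟩) ((v.reg .rsp).toNat - 1480) s.mem := by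
    have eb : Ghost.base ⟨len, A0, frames, v, ret⟩ = (v.reg .rsp).toNat - Vorbis.Frames.start_decoder.raOff := by
      show (v.reg .rsp).toNat - 1480 + 0x50 = (v.reg .rsp).toNat - 1400
      omega
    unfold Ghost.frames'
    rw [eb, hmem]
    exact (hsh.inv.untouched hunM).prologue_ra Vorbis.Frames.start_decoder_ok h8
      (by show (v.reg .rsp).toNat - 1480 ≤ (v.reg .rsp).toNat - 1400; omega) (by omega) (by omega)
  -- the live set grew by the own frame's objects
  have hlive : ∀ x, Asan.Live (stackObjs frames ++ A0.2) x →
      Ghost.Live ⟨len, A0, frames, v, ret⟩ A0 x := by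
    intro x hx
    obtain ⟨o, ho, hb⟩ := hx
    refine ⟨o, ?_, hb⟩
    unfold Ghost.frames'
    rw [stackObjs_cons, List.append_assoc]
    exact List.mem_append_right _ ho
  refine ⟨?frame, hhand, ?rbp, ?rdi, ?p3⟩
  case rbp =>
    rw [hrbp]
    exact (addr_toNat _).symm
  case rdi =>
    rw [hrdi]
    exact (addr_toNat _).symm
  case p3 =>
    have hf : Ghost.f ⟨len, A0, frames, v, ret⟩ + 1808 ≤ 0xC00000 := hw2
    exact p3_frame hp3 hshadow.covers hlive hobj hf
  case frame =>
    -- a stack slot `[RA − k]` of the walker is the `u64` at `R + (1480 − k)` of the assertion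
    have slot : ∀ (k j x : Nat), k ≤ 1480 → j + k = 1480 → s.mem.readLE (v.reg .rsp - UInt64.ofNat k) 8 = x →
        s.mem.u64 ((v.reg .rsp).toNat - 1480 + j) = x := by
      intro k j x hk hj hx
      have ea : addr ((v.reg .rsp).toNat - 1480 + j) = v.reg .rsp - UInt64.ofNat k := by
        unfold addr
        u_omega
      unfold Mem.u64
      rw [ea]
      exact hx
    refine
      { entry := he
        rip := hrip
        rsp := ?rsp
        shadowIdx := ?idx
        saved_rbx := slot 48 0x598 _ (by omega) (by omega) hrbx
        saved_rbp := slot 40 0x5a0 _ (by omega) (by omega) hrbp'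
        saved_r12 := slot 32 0x5a8 _ (by omega) (by omega) hr12
        saved_r13 := slot 24 0x5b0 _ (by omega) (by omega) hr13
        saved_r14 := slot 16 0x5b8 _ (by omega) (by omega) hr14
        saved_r15 := slot 8 0x5c0 _ (by omega) (by omega) hr15
        saved_ra := ?ra
        code := hcode
        inv := hinv
        shadow := hshadow
        offText := hsh.offText
        ext := Arena.Extends.refl _
        callers := ?callers
        sh7 := ?sh7
        same := ?same }
    case rsp =>
      rw [hrsp]
      show v.reg .rsp - 1480 = addr ((v.reg .rsp).toNat - 1480)
      unfold addr
      u_omega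
    case idx =>
      have h1 := slot 1472 8 _ (by omega) (by omega) hidx
      have h2 : ((v.reg .rsp - 1400) >>> 3).toNat = ((v.reg .rsp).toNat - 1480 + 0x50) / 8 := by
        u_omega
      rw [h2] at h1
      exact h1
    case ra =>
      have ea : addr ((v.reg .rsp).toNat - 1480 + 0x5c8) = v.reg .rsp := by
        unfold addr
        u_omega
      show s.mem.u64 ((v.reg .rsp).toNat - 1480 + 0x5c8) = ret.toNat
      unfold Mem.u64
      rw [ea, ← hra, UInt64.toNat_ofNat']
      have hlt := X86.User.Mem.readLE_lt' s.mem (v.reg .rsp) 8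
      omega
    case callers =>
      intro bF hbF
      obtain ⟨_, _, k3, _, _⟩ := hsh.inv.stack.active bF hbF
      exact k3
    case sh7 =>
      intro i hi
      have hg : Mem.EqOn 0x120640 (0x120640 + 16) v.mem s.mem := eqOn_of_wins2 hsame _ _ (by omega) (by omega)
      have hr := hg.readLE_addr (0x120640 + i) 1 (by omega) (by omega) (by omega)
      have hl := hlog i hi
      show s.mem.readLE (addr (0x120640 + i)) 1 = _
      rw [hr]
      exact hl
    case same =>
      -- the stack window lies inside `[RA − 1888, RA)`, the shadow window is the last window of `writes`
      apply hsame.mono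
      intro w hw a ha1 ha2
      simp only [wins2, List.mem_cons, List.mem_nil_iff, or_false] at hw
      rcases hw with rfl | rfl
      · refine ⟨⟨(v.reg .rsp).toNat - 1888, (v.reg .rsp).toNat⟩, List.mem_cons_self, ?_, ?_⟩
        · simp only at ha1 ⊢
          omega
        · exact ha2
      · refine ⟨shadowSpan ((v.reg .rsp).toNat - 1400) ((v.reg .rsp).toNat - 1400 + Vorbis.Frames.start_decoder.size), ?_, ?_, ?_⟩
        · unfold StartDecoder.footprint StartDecoder.writes
          exact List.mem_cons_of_mem _ (List.mem_cons_of_mem _ (List.mem_cons_of_mem _ (List.mem_cons_of_mem _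
            (List.mem_cons_of_mem _ List.mem_cons_self))))
        · exact ha1
        · have es : Vorbis.Frames.start_decoder.size = 1344 := rfl
          simp only [shadowSpan, es] at ha2 ⊢
          omega

end Vorbis.Spec.start_decoder_1

/-- Segment 1 of `start_decoder` (0x113980 … 0x113a21, C line 3608: the prologue): six pushes, `sub rsp, 598H`, `rbp = f`, the three
header words of the protected frame, the spill of `base >> 3`, the eleven inline shadow stores. From the function's entry (`At1`)
to the cut point 0x113a2b (`At2`): ONE walk without side goals, then `body2_of_walk` builds the exit assertion. -/
theorem Vorbis.Spec.Worked.start_decoder_1_ok : Vorbis.Spec.start_decoder_1.Statement := by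
  intro Lay hLay μ hμ u₀ hcode g v hat
  obtain ⟨len, A0, frames, e, ret⟩ := g
  obtain ⟨hhere, he, hpre⟩ := hat
  have hhere' : v = e := hhere
  subst hhere'
  have he0 := he
  have hpre0 := hpre
  v_entry he
  obtain ⟨hsh, hp3, hhand, hlog⟩ := hpre
  have hsp := hsh.rsp
  have hroom : 0x700000 + 1888 ≤ (v.reg .rsp).toNat := he_room
  -- 0x113980 (C line 3608): the prologue, walked to the cut point
  u_walk hcode [hμ.vendor] until [Vorbis.L.start_decoder.cut1] span [Vorbis.L.textLo, Vorbis.L.textHi] side (v_side)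
  -- 0x113a2b (C line 3614): the exit assertion `At2`, for the entry's ghost arena
  refine ReachVia.done ⟨A0, ?_⟩
  -- DF = 0 (the `shr` wrote status flags only) and the MXCSR masks, as at the entry
  have hinv : abiInv s_113a21 := by
    refine Vorbis.abiInv_of ?_ ?_
    · rw [w_flags]
      simp only [X86.User.df_setStatus]
      exact he_df
    · rw [w_mxcsr]
      exact he_mx
  -- the memory in the form of `ShadowInv.prologue_ra`: `M` = the entry memory with the ten stack stores
  have w_mem' := w_mem
  rw [Vorbis.Spec.start_decoder_1.shadow_nest _ _ he_align hroom he_top] at w_mem'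
  generalize hM : Mem.writeLE _ (v.reg Reg.rsp - 1472) 8 _ = M at w_mem'
  have hunM : ShadowUntouched v.mem M := by
    rw [← hM]
    unfold Asan.ShadowUntouched
    u_eqon
  -- the footprint of the ten stack stores
  have hsameM : Mem.SameExcept [⟨(v.reg .rsp).toNat - 1480, (v.reg .rsp).toNat⟩] v.mem M := by
    rw [← hM]
    u_same
  -- the stack slots, read in `M`: the spill of `base >> 3`, the six pushes, the return address
  have midx : M.readLE (v.reg .rsp - 1472) 8 = ((v.reg .rsp - 1400) >>> 3).toNat := by
    rw [← hM]
    u_read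
  have mrbx : M.readLE (v.reg .rsp - 48) 8 = (v.reg .rbx).toNat := by
    rw [← hM]
    u_read
  have mrbp : M.readLE (v.reg .rsp - 40) 8 = (v.reg .rbp).toNat := by
    rw [← hM]
    u_read
  have mr12 : M.readLE (v.reg .rsp - 32) 8 = (v.reg .r12).toNat := by
    rw [← hM]
    u_read
  have mr13 : M.readLE (v.reg .rsp - 24) 8 = (v.reg .r13).toNat := by
    rw [← hM]
    u_read
  have mr14 : M.readLE (v.reg .rsp - 16) 8 = (v.reg .r14).toNat := by
    rw [← hM]
    u_read
  have mr15 : M.readLE (v.reg .rsp - 8) 8 = (v.reg .r15).toNat := by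
    rw [← hM]
    u_read
  have mra : M.readLE (v.reg .rsp) 8 = v.mem.readLE (v.reg .rsp) 8 := by
    have hq : Mem.EqOn (v.reg .rsp).toNat ((v.reg .rsp).toNat + 8) v.mem M := by
      rw [← hM]
      u_eqon
    exact hq.readLE _ 8 (Nat.le_refl _) (Nat.le_refl _) (by omega)
  exact Vorbis.Spec.start_decoder_1.body2_of_walk he0 hpre0 hunM w_mem' hsameM w_rip w_rsp w_rbp (w_kept .rdi rfl)
    midx mrbx mrbp mr12 mr13 mr14 mr15 mra w_eq hinv
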